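-- pv_equiv track=rewrite | github.com/tenten1010/creativeInfo2016 | 20150806.py | getFourNine
-- ===== SOURCE A (Python) =====
-- def getFourNine(dec):
-- 	result = 0
-- 	dec = dec[::-1]
-- 	for i in range(len(dec)):
-- 		if dec[i] == "9":
-- 			result += 9 * 10 ** i
-- 			if i+1 < len(dec):
-- 				if dec[i+1] == "4":
-- 					result += 4 * 10 ** (i+1)
-- 					break
-- 				elif dec[i+1] == "9":
-- 					continue
-- 				else:
-- 					break
-- 	return result
-- ===== SOURCE B (Python) =====
-- def getFourNine(dec):
--     # Find the rightmost run of 9s and compute its value in closed form,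
--     # instead of accumulating digit by digit.
--     r = dec[::-1]
--     k = r.find('9')
--     if k == -1:
--         return 0
--     t = r[k:]
--     m = len(t) - len(t.lstrip('9'))
--     val = 10 ** m - 1
--     if m < len(t) and t[m] == '4':
--         val += 4 * 10 ** m
--     return val * 10 ** k
-- ===== Notes on version B (the rewrite author's own statement) =====
-- stated objective: faster
-- what changed: Instead of accumulating 9*10^i digit by digit in a scan-with-break over the reversed string, B locates the rightmost run of 9s with str.find/str.lstrip and computes the result in closed form as (10^m - 1 [+ 4*10^m if a '4' precedes the run]) * 10^k.
import Mathlib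
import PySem

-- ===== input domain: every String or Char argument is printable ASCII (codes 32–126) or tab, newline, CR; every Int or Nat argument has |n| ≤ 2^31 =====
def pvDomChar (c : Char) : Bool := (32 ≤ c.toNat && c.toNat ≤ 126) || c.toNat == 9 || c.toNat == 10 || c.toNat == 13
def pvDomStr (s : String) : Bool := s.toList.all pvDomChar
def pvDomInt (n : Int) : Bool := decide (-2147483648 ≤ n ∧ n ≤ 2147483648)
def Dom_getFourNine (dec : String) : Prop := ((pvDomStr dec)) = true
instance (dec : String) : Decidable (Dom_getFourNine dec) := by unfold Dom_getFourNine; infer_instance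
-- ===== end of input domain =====

-- B replaces A's digit-by-digit accumulation over the reversed string by locating the
-- rightmost run of 9s (find/lstrip) and evaluating it in closed form (objective: alternative).


-- ===== PORT A =====
-- the for-loop over the reversed string, with `result` the accumulator and `break`
-- returning the accumulated value; reads dec[i] (head) and dec[i+1] (head of tail)
def getFourNineLoop : List Char → Nat → Int → Int
  | [], _, result => result
  | c :: rest, i, result =>
    if c = '9' then
      let result := result + 9 * 10 ^ i
      match rest with
      | [] => result                                 -- i+1 < len fails: no iterations left
      | d :: _ =>
        if d = '4' then result + 4 * 10 ^ (i + 1)    -- break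
        else if d = '9' then getFourNineLoop rest (i + 1) result
        else result                                   -- break
    else getFourNineLoop rest (i + 1) result

def getFourNine (dec : String) : Int :=
  -- dec = dec[::-1]
  let dec := (PySem.Str.slice? dec none none (-1)).getD ""
  getFourNineLoop dec.toList 0 0

-- ===== PORT B =====
def getFourNine_alt (dec : String) : Int :=
  let r := (PySem.Str.slice? dec none none (-1)).getD ""   -- r = dec[::-1]
  let k := PySem.Str.find r "9"                            -- k = r.find('9')
  if k = -1 then 0
  else
    let t := PySem.Str.slice r (some k) none               -- t = r[k:]
    -- t.lstrip('9') ported by hand, exactly: drop the leading '9' code points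
    let m : Nat := t.toList.length - (t.toList.dropWhile (· = '9')).length
    let val := (10 : Int) ^ m - 1
    let val :=
      if (m : Int) < PySem.Str.len t ∧ PySem.Str.pyGet? t (m : Int) = some '4' then
        val + 4 * 10 ^ m
      else val
    val * 10 ^ k.toNat

-- ===== PRECONDITION & SPEC =====
def Spec_getFourNine (dec : String) (out : Int) : Prop := out = getFourNine_alt dec
instance (dec : String) (out : Int) : Decidable (Spec_getFourNine dec out) := by unfold Spec_getFourNine; infer_instance

-- ===== CLAIM (what is proved, stated in full; the proofs are below) =====
def Claim_equal_getFourNine : Prop := ∀ (dec : String), Dom_getFourNine dec → Spec_getFourNine dec (getFourNine dec)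

-- ===== LEMMAS AND PROOFS =====

theorem drop_takeWhile_len (p : Char → Bool) (l : List Char) :
    l.drop (l.takeWhile p).length = l.dropWhile p := by
  induction l with
  | nil => rfl
  | cons a t ih =>
    by_cases h : p a <;> simp [h, ih]

theorem singleton_prefix_iff (c : Char) (xs : List Char) :
    [c] <+: xs ↔ xs.head? = some c := by
  cases xs with
  | nil => simp
  | cons x t => simp [List.cons_prefix_cons, eq_comm]

theorem singleton_infix_iff (c : Char) (r : List Char) :
    [c] <:+: r ↔ c ∈ r := by
  constructor
  · intro h; exact h.mem (by simp)
  · intro h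
    obtain ⟨s, t, rfl⟩ := List.append_of_mem h
    exact ⟨s, t, by simp⟩

-- one step of the loop through two consecutive 9s ('continue' branch)
theorem loop_step_99 (rest : List Char) (i : Nat) (result : Int) :
    getFourNineLoop ('9' :: '9' :: rest) i result =
      getFourNineLoop ('9' :: rest) (i + 1) (result + 9 * 10 ^ i) := rfl

-- skipping the non-'9' prefix only advances the index
theorem loop_skip (l : List Char) (i : Nat) (result : Int) :
    getFourNineLoop l i result =
      getFourNineLoop (l.dropWhile (· ≠ '9')) (i + (l.takeWhile (· ≠ '9')).length) result := by
  induction l generalizing i with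
  | nil => rfl
  | cons c rest ih =>
    by_cases hc : c = '9'
    · subst hc; simp [getFourNineLoop]
    · simp only [getFourNineLoop, if_neg hc]
      rw [ih (i + 1)]
      simp only [List.dropWhile_cons, List.takeWhile_cons, ne_eq, hc, not_false_eq_true,
        decide_true, if_true, List.length_cons]
      congr 1
      omega

-- value of the loop on a list starting with '9'
theorem loop_run (l : List Char) (i : Nat) (result : Int) (h : l.head? = some '9') :
    getFourNineLoop l i result =
      result + 10 ^ i *
        ((10 ^ (l.takeWhile (· = '9')).length - 1) +
          (if (l.dropWhile (· = '9')).head? = some '4'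
            then 4 * 10 ^ (l.takeWhile (· = '9')).length else 0)) := by
  induction l generalizing i result with
  | nil => simp at h
  | cons c rest ih =>
    simp only [List.head?_cons, Option.some_inj] at h
    subst h
    match rest, ih with
    | [], _ =>
      simp [getFourNineLoop]
      ring
    | d :: rest', ih =>
      by_cases h4 : d = '4'
      · subst h4
        simp [getFourNineLoop]
        ring
      · by_cases h9 : d = '9'
        · subst h9
          rw [loop_step_99, ih (i + 1) _ rfl]
          simp only [List.takeWhile_cons, List.dropWhile_cons, decide_true, if_true,
            List.length_cons]
          split_ifs <;> ring
        · simp only [getFourNineLoop, if_neg h4, if_neg h9]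
          simp [h4, h9]
          ring

-- the first index whose element is c, as head-of-drop facts
theorem firstIdx (c : Char) (r : List Char) (h : c ∈ r) :
    (r.drop (r.takeWhile (· ≠ c)).length).head? = some c ∧
      ∀ i < (r.takeWhile (· ≠ c)).length, (r.drop i).head? ≠ some c := by
  induction r with
  | nil => simp at h
  | cons a t ih =>
    by_cases ha : a = c
    · subst ha; simp
    · have hct : c ∈ t := by
        rcases List.mem_cons.mp h with h' | h'
        · exact absurd h'.symm ha
        · exact h'
      obtain ⟨h1, h2⟩ := ih hct
      have hlen : ((a :: t).takeWhile (· ≠ c)).length = (t.takeWhile (· ≠ c)).length + 1 := by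
        simp [ha]
      rw [hlen]
      constructor
      · simpa using h1
      · intro i hi
        match i with
        | 0 => simpa using fun hh => ha hh
        | i + 1 => simpa using h2 i (by omega)

-- characterisation of r.find('9') as the length of the non-'9' prefix
theorem find_nine (r : List Char) :
    PySem.Chars.find r ['9'] =
      if '9' ∈ r then ((r.takeWhile (· ≠ '9')).length : Int) else -1 := by
  by_cases h : '9' ∈ r
  · rw [if_pos h]
    have hnn : 0 ≤ PySem.Chars.find r ['9'] := by
      rw [PySem.Chars.find_nonneg_iff, singleton_infix_iff]; exact h
    obtain ⟨hp, hmin⟩ := PySem.Chars.find_spec (s := r) (sub := ['9']) hnn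
    obtain ⟨g1, g2⟩ := firstIdx '9' r h
    set f := (PySem.Chars.find r ['9']).toNat with hf
    set j := (r.takeWhile (· ≠ '9')).length with hj
    have hfj : f = j := by
      have h1 : ¬ j < f := fun hlt => (hmin j hlt) ((singleton_prefix_iff '9' _).mpr g1)
      have h2 : ¬ f < j := fun hlt => (g2 f hlt) ((singleton_prefix_iff '9' _).mp hp)
      omega
    omega
  · rw [if_neg h, PySem.Chars.find_eq_neg_one_iff]
    rw [singleton_infix_iff]
    exact h

theorem main_eq (dec : String) : getFourNine dec = getFourNine_alt dec := by
  unfold getFourNine getFourNine_alt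
  rw [PySem.Str.slice?_none_none_neg_one]
  simp only [Option.getD_some, String.toList_ofList]
  set r : List Char := dec.toList.reverse with hr
  have hfind : PySem.Str.find (String.ofList r) "9" = PySem.Chars.find r ['9'] := by simp
  by_cases h : '9' ∈ r
  · -- r contains a 9: both sides compute the value of the rightmost run
    set j := (r.takeWhile (· ≠ '9')).length with hj
    set l := r.dropWhile (· ≠ '9') with hl
    have hfj : PySem.Str.find (String.ofList r) "9" = (j : Int) := by
      rw [hfind, find_nine, if_pos h]
    have hne : ¬ PySem.Str.find (String.ofList r) "9" = -1 := by rw [hfj]; omega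
    rw [if_neg hne, hfj]
    have htl : (PySem.Str.slice (String.ofList r) (some (j : Int)) none).toList = l := by
      simp [PySem.Str.toList_slice, PySem.List.slice_from_natCast]
      rw [hl, ← drop_takeWhile_len]
    set t := PySem.Str.slice (String.ofList r) (some (j : Int)) none with ht
    set m := t.toList.length - (t.toList.dropWhile (· = '9')).length with hm
    have hsplit := congrArg List.length (List.takeWhile_append_dropWhile (p := (· = '9')) (l := l))
    simp only [List.length_append] at hsplit
    have hm' : m = (l.takeWhile (· = '9')).length := by
      rw [hm, htl]; omega
    -- the head of l is '9' (l starts at the first 9)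
    have hhead : l.head? = some '9' := by
      rw [hl, ← drop_takeWhile_len]
      exact (firstIdx '9' r h).1
    -- the '4' test of B is the head-of-dropWhile test of the closed form
    have hget : PySem.Str.pyGet? t (m : Int) = (l.dropWhile (· = '9')).head? := by
      simp only [PySem.Str.pyGet?_natCast, htl]
      rw [hm', ← List.head?_drop, drop_takeWhile_len]
    have hlent : PySem.Str.len t = (l.length : Int) := by
      simp only [PySem.Str.len_eq, htl]
    have hcond : ((m : Int) < PySem.Str.len t ∧ PySem.Str.pyGet? t (m : Int) = some '4')
        ↔ (l.dropWhile (· = '9')).head? = some '4' := by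
      constructor
      · exact fun hc => hget ▸ hc.2
      · intro hc
        refine ⟨?_, hget ▸ hc⟩
        have hne' : l.dropWhile (· = '9') ≠ [] := by
          intro hnil; rw [hnil] at hc; simp at hc
        have hlt : (l.dropWhile (· = '9')).length ≠ 0 := fun hz => hne' (List.eq_nil_of_length_eq_zero hz)
        rw [hlent]
        omega
    -- A's side: skip the non-9 prefix of the reversed string, then run through the 9s
    rw [loop_skip, loop_run _ _ _ hhead]
    rw [← hm']
    have htoNat : ((j : Int)).toNat = j := by omega
    rw [htoNat]
    by_cases hc4 : (l.dropWhile (· = '9')).head? = some '4'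
    · rw [if_pos hc4, if_pos (hcond.mpr hc4)]
      simp only [zero_add]
      ring
    · rw [if_neg hc4, if_neg (fun hx => hc4 (hcond.mp hx))]
      simp only [zero_add]
      ring
  · -- no 9 anywhere: both sides are 0
    have hfe : PySem.Str.find (String.ofList r) "9" = -1 := by
      rw [hfind, find_nine, if_neg h]
    rw [if_pos hfe, loop_skip]
    have : r.dropWhile (· ≠ '9') = [] := by
      rw [List.dropWhile_eq_nil_iff]
      intro x hx
      simp only [ne_eq, decide_eq_true_eq]
      exact fun hx9 => h (hx9 ▸ hx)
    rw [this]
    rfl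

-- ===== VERDICT (by name: the statement is the Claim_ definition above) =====
theorem getFourNine_spec : Claim_equal_getFourNine := by
  intro dec _
  exact main_eq dec
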